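-- pv_equiv track=rewrite | github.com/MDAkramSiddiqui/python_code | hash_tables.py | min_cuts
-- ===== SOURCE A (Python) =====
-- from collections import defaultdict
--
-- def min_cuts(wall):
--     hash = defaultdict(int)
--
--     for row in wall:
--         length = 0
--         for size in row[:-1]:
--             length += size
--             hash[length] += 1
--
--     return len(wall) - max(hash.values())
-- ===== SOURCE B (Python) =====
-- def min_cuts(wall):
--     positions = []
--     for row in wall:
--         length = 0
--         for size in row[:-1]:
--             length += size
--             positions.append(length)
--     positions.sort()
--     best = 0
--     i = 0
--     n = len(positions)
--     while i < n:
--         j = i + 1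
--         while j < n and positions[j] == positions[i]:
--             j += 1
--         if j - i > best:
--             best = j - i
--         i = j
--     return len(wall) - best
-- ===== Notes on version B (the rewrite author's own statement) =====
-- stated objective: alternative
-- what changed: Replaces the defaultdict frequency table with flattening all cumulative interior edge positions into one list, sorting it, and scanning for the longest run of equal positions (where A raises ValueError on a wall with no interior edges, B returns len(wall); those inputs are outside Pre_).
import Mathlib
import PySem

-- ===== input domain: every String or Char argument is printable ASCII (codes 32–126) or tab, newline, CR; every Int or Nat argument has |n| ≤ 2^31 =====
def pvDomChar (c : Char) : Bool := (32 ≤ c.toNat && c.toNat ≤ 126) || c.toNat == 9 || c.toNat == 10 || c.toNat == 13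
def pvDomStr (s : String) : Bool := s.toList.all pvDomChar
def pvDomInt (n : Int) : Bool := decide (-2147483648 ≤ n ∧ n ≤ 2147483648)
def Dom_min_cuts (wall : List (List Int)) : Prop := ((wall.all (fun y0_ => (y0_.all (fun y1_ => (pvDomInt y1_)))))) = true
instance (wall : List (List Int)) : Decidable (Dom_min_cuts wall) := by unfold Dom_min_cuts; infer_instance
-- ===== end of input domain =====

-- B replaces A's defaultdict frequency table by flattening all cumulative interior edge
-- positions, sorting them, and scanning for the longest run of equal positions (objective:
-- alternative decomposition, not claimed faster). Where A raises ValueError (no interior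
-- edges at all, i.e. every row has at most one brick) B returns len(wall); those
-- inputs are outside Pre_.

-- ===== PORT A =====
def min_cuts (wall : List (List Int)) : Int :=
  let h : PySem.Dict Int Int :=
    wall.foldl (fun h row =>
      ((PySem.List.slice row none (some (-1))).foldl
        (fun (p : PySem.Dict Int Int × Int) size =>
          (p.1.modify (p.2 + size) 0 (· + 1), p.2 + size)) (h, (0 : Int))).1)
      PySem.Dict.empty
  -- max(hash.values()) raises ValueError on an empty dict: excluded by Pre_ (getD 0 is dead there)
  (wall.length : Int) - (PySem.List.max? h.values (fun v => v)).getD 0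

-- ===== PORT B =====
-- the two nested while loops of Source B: the inner while (advance j over equal elements)
-- is takeWhile/dropWhile from the current position, the outer while is the recursion
def maxRun : List Int → Int
  | [] => 0
  | a :: t =>
      max ((t.takeWhile (· == a)).length + 1 : Int) (maxRun (t.dropWhile (· == a)))
termination_by l => l.length
decreasing_by
  simp only [List.length_cons]
  exact Nat.lt_succ_of_le (List.length_dropWhile_le _ _)

def min_cuts_alt (wall : List (List Int)) : Int :=
  let positions :=
    wall.foldl (fun acc row =>
      ((PySem.List.slice row none (some (-1))).foldl
        (fun (p : List Int × Int) size =>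
          (p.1 ++ [p.2 + size], p.2 + size)) (acc, (0 : Int))).1) []
  let s := PySem.List.sorted positions (fun x => x) false
  (wall.length : Int) - maxRun s

-- ===== PRECONDITION & SPEC =====
-- Pre_ excludes exactly the walls with no interior edges (every row has at most one
-- brick): there A's max(hash.values()) raises ValueError on an empty sequence.
def Pre_min_cuts (wall : List (List Int)) : Prop := ∃ row ∈ wall, 2 ≤ row.length
instance (wall : List (List Int)) : Decidable (Pre_min_cuts wall) := by unfold Pre_min_cuts; infer_instance
def pvWitness_min_cuts : List (List Int) := [[1, 2], [3]]

-- On walls whose rows all have at most one brick A raises ValueError (max of an empty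
-- sequence); B returns len(wall), the cuts made by an unavoidable full vertical line.

def Spec_min_cuts (wall : List (List Int)) (out : Int) : Prop := out = min_cuts_alt wall
instance (wall : List (List Int)) (out : Int) : Decidable (Spec_min_cuts wall out) := by unfold Spec_min_cuts; infer_instance

-- ===== CLAIM (what is proved, stated in full; the proofs are below) =====
def Claim_equal_min_cuts : Prop := ∀ (wall : List (List Int)), Dom_min_cuts wall → Pre_min_cuts wall → Spec_min_cuts wall (min_cuts wall)

-- ===== LEMMAS AND PROOFS =====

-- the cumulative interior edge positions of one row (row[:-1] already taken)
def prefs (s : Int) : List Int → List Int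
  | [] => []
  | x :: t => (s + x) :: prefs (s + x) t

def updCnt (d : PySem.Dict Int Int) (x : Int) : PySem.Dict Int Int := d.modify x 0 (· + 1)

def flatEdges (wall : List (List Int)) : List Int :=
  wall.flatMap (fun row => prefs 0 row.dropLast)

theorem innerA (xs : List Int) (d : PySem.Dict Int Int) (s : Int) :
    (xs.foldl (fun (p : PySem.Dict Int Int × Int) size =>
      (p.1.modify (p.2 + size) 0 (· + 1), p.2 + size)) (d, s)).1
    = (prefs s xs).foldl updCnt d := by
  induction xs generalizing d s with
  | nil => rfl
  | cons x t ih => simp [prefs, updCnt, List.foldl_cons, ih]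

theorem innerB (xs : List Int) (acc : List Int) (s : Int) :
    (xs.foldl (fun (p : List Int × Int) size =>
      (p.1 ++ [p.2 + size], p.2 + size)) (acc, s)).1
    = acc ++ prefs s xs := by
  induction xs generalizing acc s with
  | nil => simp [prefs]
  | cons x t ih => simp [prefs, List.foldl_cons, ih]

theorem outerA (wall : List (List Int)) (d : PySem.Dict Int Int) :
    wall.foldl (fun h row =>
      ((PySem.List.slice row none (some (-1))).foldl
        (fun (p : PySem.Dict Int Int × Int) size =>
          (p.1.modify (p.2 + size) 0 (· + 1), p.2 + size)) (h, (0 : Int))).1) d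
    = (flatEdges wall).foldl updCnt d := by
  have hfun : (fun (h : PySem.Dict Int Int) (row : List Int) =>
      ((PySem.List.slice row none (some (-1))).foldl
        (fun (p : PySem.Dict Int Int × Int) size =>
          (p.1.modify (p.2 + size) 0 (· + 1), p.2 + size)) (h, (0 : Int))).1)
      = fun h row => (prefs 0 row.dropLast).foldl updCnt h := by
    funext h row
    rw [PySem.List.slice_to_neg_one, innerA]
  rw [hfun]
  induction wall generalizing d with
  | nil => rfl
  | cons row rest ih =>
      simp only [List.foldl_cons, ih, flatEdges, List.flatMap_cons, List.foldl_append]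

theorem outerB (wall : List (List Int)) (acc : List Int) :
    wall.foldl (fun acc row =>
      ((PySem.List.slice row none (some (-1))).foldl
        (fun (p : List Int × Int) size =>
          (p.1 ++ [p.2 + size], p.2 + size)) (acc, (0 : Int))).1) acc
    = acc ++ flatEdges wall := by
  have hfun : (fun (acc : List Int) (row : List Int) =>
      ((PySem.List.slice row none (some (-1))).foldl
        (fun (p : List Int × Int) size =>
          (p.1 ++ [p.2 + size], p.2 + size)) (acc, (0 : Int))).1)
      = fun acc row => acc ++ prefs 0 row.dropLast := by
    funext acc row
    rw [PySem.List.slice_to_neg_one, innerB]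
  rw [hfun]
  induction wall generalizing acc with
  | nil => simp [flatEdges]
  | cons row rest ih =>
      simp only [List.foldl_cons, ih, flatEdges, List.flatMap_cons, List.append_assoc]

theorem dropWhile_head_false {p : Int → Bool} {t b : List Int} {x : Int} :
    t.dropWhile p = x :: b → p x = false := by
  induction t with
  | nil => intro h; simp at h
  | cons y t ih =>
      intro h
      by_cases hy : p y
      · simp [hy] at h; exact ih h
      · simp [hy] at h
        rcases h with ⟨h1, _⟩
        simpa [← h1] using hy

-- every element of dropWhile (· == a) in a sorted list is strictly greater than a
theorem dropWhile_gt (a : Int) (t : List Int) (hp : (a :: t).Pairwise (· ≤ ·)) :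
    ∀ y ∈ t.dropWhile (· == a), a < y := by
  rcases hdw : t.dropWhile (· == a) with _ | ⟨b, r⟩
  · intro y hy; simp at hy
  · have hbne : ¬ (b = a) := by
      have := dropWhile_head_false hdw
      simpa using this
    have hmem : ∀ y ∈ b :: r, y ∈ t := by
      intro y hy
      exact (List.dropWhile_sublist _).mem (by rw [hdw]; exact hy)
    have hab : a ≤ b := (List.pairwise_cons.mp hp).1 b (hmem b (by simp))
    have haltb : a < b := lt_of_le_of_ne hab (fun h => hbne h.symm)
    have hpt : t.Pairwise (· ≤ ·) := (List.pairwise_cons.mp hp).2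
    have hpd : (b :: r).Pairwise (· ≤ ·) := by
      rw [← hdw]; exact hpt.sublist (List.dropWhile_sublist _)
    intro y hy
    rcases List.mem_cons.mp hy with rfl | hy'
    · exact haltb
    · exact lt_of_lt_of_le haltb ((List.pairwise_cons.mp hpd).1 y hy')

theorem count_head_sorted (a : Int) (t : List Int) (hp : (a :: t).Pairwise (· ≤ ·)) :
    ((a :: t).count a : Int) = (t.takeWhile (· == a)).length + 1 := by
  have hsplit : t = t.takeWhile (· == a) ++ t.dropWhile (· == a) :=
    (List.takeWhile_append_dropWhile (p := (· == a)) (l := t)).symm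
  have h1 : (t.takeWhile (· == a)).count a = (t.takeWhile (· == a)).length := by
    rw [List.count_eq_length]
    intro b hb
    have hb' : b = a := by simpa using List.mem_takeWhile_imp hb
    exact hb'.symm ▸ rfl
  have h2 : (t.dropWhile (· == a)).count a = 0 := by
    rw [List.count_eq_zero]
    intro hmem
    exact absurd (dropWhile_gt a t hp a hmem) (lt_irrefl a)
  rw [List.count_cons_self]
  conv_lhs => rw [hsplit]
  rw [List.count_append, h1, h2]
  push_cast
  ring

theorem count_tail_sorted (a : Int) (t : List Int) (hp : (a :: t).Pairwise (· ≤ ·))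
    (x : Int) (hx : x ∈ t.dropWhile (· == a)) :
    (a :: t).count x = (t.dropWhile (· == a)).count x := by
  have hax : a < x := dropWhile_gt a t hp x hx
  have hsplit : t = t.takeWhile (· == a) ++ t.dropWhile (· == a) :=
    (List.takeWhile_append_dropWhile (p := (· == a)) (l := t)).symm
  have hxa : x ≠ a := ne_of_gt hax
  have h1 : (t.takeWhile (· == a)).count x = 0 := by
    rw [List.count_eq_zero]
    intro hmem
    have := List.mem_takeWhile_imp hmem
    exact hxa (by simpa using this)
  rw [List.count_cons_of_ne (Ne.symm hxa)]
  conv_lhs => rw [hsplit]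
  rw [List.count_append, h1, Nat.zero_add]

theorem count_le_maxRun : ∀ (n : Nat) (S : List Int), S.length ≤ n →
    S.Pairwise (· ≤ ·) → ∀ x ∈ S, (S.count x : Int) ≤ maxRun S := by
  intro n
  induction n with
  | zero =>
      intro S hlen _ x hx
      have : S = [] := List.eq_nil_of_length_eq_zero (Nat.le_zero.mp hlen)
      subst this; simp at hx
  | succ n ih =>
      intro S hlen hp x hx
      match S with
      | [] => simp at hx
      | a :: t =>
        rw [show maxRun (a :: t) = max ((t.takeWhile (· == a)).length + 1 : Int)
              (maxRun (t.dropWhile (· == a))) from by rw [maxRun]]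
        by_cases hxa : x = a
        · subst hxa
          have := count_head_sorted x t hp
          rw [this]
          exact le_max_left _ _
        · have hxt : x ∈ t := by
            rcases List.mem_cons.mp hx with h | h
            · exact absurd h hxa
            · exact h
          have hxd : x ∈ t.dropWhile (· == a) := by
            have hsplit := (List.takeWhile_append_dropWhile (p := (· == a)) (l := t))
            rw [← hsplit] at hxt
            rcases List.mem_append.mp hxt with h | h
            · exact absurd (by simpa using List.mem_takeWhile_imp h) hxa
            · exact h
          rw [count_tail_sorted a t hp x hxd]
          have hlen2 : (t.dropWhile (· == a)).length ≤ n := by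
            have h1 := List.length_dropWhile_le (· == a) t
            have h2 : t.length ≤ n := by simpa using Nat.lt_succ_iff.mp (Nat.lt_of_lt_of_le (by simp) hlen)
            omega
          have hpd : (t.dropWhile (· == a)).Pairwise (· ≤ ·) :=
            ((List.pairwise_cons.mp hp).2).sublist (List.dropWhile_sublist _)
          exact le_trans (ih _ hlen2 hpd x hxd) (le_max_right _ _)

theorem maxRun_attained : ∀ (n : Nat) (S : List Int), S.length ≤ n →
    S.Pairwise (· ≤ ·) → S ≠ [] → ∃ y ∈ S, maxRun S = (S.count y : Int) := by
  intro n
  induction n with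
  | zero =>
      intro S hlen _ hne
      exact absurd (List.eq_nil_of_length_eq_zero (Nat.le_zero.mp hlen)) hne
  | succ n ih =>
      intro S hlen hp hne
      match S with
      | [] => exact absurd rfl hne
      | a :: t =>
        rw [show maxRun (a :: t) = max ((t.takeWhile (· == a)).length + 1 : Int)
              (maxRun (t.dropWhile (· == a))) from by rw [maxRun]]
        by_cases hdw : t.dropWhile (· == a) = []
        · refine ⟨a, by simp, ?_⟩
          rw [count_head_sorted a t hp, hdw,
            show maxRun ([] : List Int) = 0 from by rw [maxRun]]
          have : (0 : Int) ≤ (t.takeWhile (· == a)).length + 1 := by positivity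
          rw [max_eq_left this]
        · have hlen2 : (t.dropWhile (· == a)).length ≤ n := by
            have h1 := List.length_dropWhile_le (· == a) t
            have h2 : t.length ≤ n := by simpa using Nat.lt_succ_iff.mp (Nat.lt_of_lt_of_le (by simp) hlen)
            omega
          have hpd : (t.dropWhile (· == a)).Pairwise (· ≤ ·) :=
            ((List.pairwise_cons.mp hp).2).sublist (List.dropWhile_sublist _)
          obtain ⟨y, hy, hyv⟩ := ih _ hlen2 hpd hdw
          by_cases hc : maxRun (t.dropWhile (· == a)) ≤ ((t.takeWhile (· == a)).length + 1 : Int)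
          · refine ⟨a, by simp, ?_⟩
            rw [count_head_sorted a t hp, max_eq_left hc]
          · refine ⟨y, ?_, ?_⟩
            · exact List.mem_cons_of_mem a ((List.dropWhile_sublist _).mem hy)
            · rw [max_eq_right (not_le.mp hc).le, hyv,
                count_tail_sorted a t hp y hy]

-- the heart: max of the counter's values equals the longest run in the sorted list
theorem maxCount_eq_maxRun (P : List Int) :
    (PySem.List.max? ((PySem.Dict.counter P).values) (fun v => v)).getD 0
      = maxRun (PySem.List.sorted P (fun x => x) false) := by
  have hvals : (PySem.Dict.counter P).values
      = (PySem.Set.ofList P).map (fun k => ((P.count k : Int))) := by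
    simp [PySem.Dict.values, PySem.Dict.items_counter]
  match P with
  | [] =>
      simp only [PySem.Dict.counter, PySem.Dict.values, PySem.Dict.empty, PySem.List.max?,
        PySem.List.sorted, List.foldl_nil, List.map_nil, Option.getD_none,
        show maxRun ([] : List Int) = 0 from by rw [maxRun]]
  | p0 :: Ptl =>
    set P := p0 :: Ptl with hP
    set S := PySem.List.sorted P (fun x => x) false with hS
    have hperm : S.Perm P := PySem.List.sorted_perm P _ _
    have hpair : S.Pairwise (· ≤ ·) := PySem.List.sorted_pairwise (xs := P) (key := fun x => x)
    have hLne : (PySem.Dict.counter P).values ≠ [] := by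
      rw [hvals]
      simp only [ne_eq, List.map_eq_nil_iff]
      intro h
      have hmem : p0 ∈ PySem.Set.ofList P := by
        rw [PySem.Set.mem_ofList, hP]; simp
      rw [h] at hmem; simp at hmem
    rcases hm : PySem.List.max? ((PySem.Dict.counter P).values) (fun v => v) with _ | m
    · exact absurd ((PySem.List.max?_eq_none_iff _ _).mp hm) hLne
    · simp only [Option.getD_some]
      have hmem := PySem.List.max?_mem hm
      rw [hvals] at hmem
      obtain ⟨x, hxS, hxv⟩ := List.mem_map.mp hmem
      have hxP : x ∈ P := (PySem.Set.mem_ofList _ _).mp hxS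
      have hxSmem : x ∈ S := hperm.mem_iff.mpr hxP
      have hcnt : S.count x = P.count x := hperm.count_eq x
      have hSne : S ≠ [] := by
        intro h; rw [h] at hxSmem; simp at hxSmem
      have hub : m ≤ maxRun S := by
        rw [← hxv, ← hcnt]
        exact count_le_maxRun S.length S le_rfl hpair x hxSmem
      have hlb : maxRun S ≤ m := by
        obtain ⟨y, hyS, hyv⟩ := maxRun_attained S.length S le_rfl hpair hSne
        have hyP : y ∈ P := hperm.mem_iff.mp hyS
        have hyL : ((P.count y : Int)) ∈ (PySem.Dict.counter P).values := by
          rw [hvals]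
          exact List.mem_map.mpr ⟨y, (PySem.Set.mem_ofList _ _).mpr hyP, rfl⟩
        have hle := PySem.List.max?_isMax hm _ hyL
        rw [hyv, hperm.count_eq y]
        exact hle
      exact le_antisymm hub hlb

theorem min_cuts_eq (wall : List (List Int)) :
    min_cuts wall = (wall.length : Int) -
      (PySem.List.max? ((PySem.Dict.counter (flatEdges wall)).values) (fun v => v)).getD 0 := by
  simp only [min_cuts]
  rw [outerA]
  rfl

theorem min_cuts_alt_eq (wall : List (List Int)) :
    min_cuts_alt wall = (wall.length : Int) -
      maxRun (PySem.List.sorted (flatEdges wall) (fun x => x) false) := by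
  simp only [min_cuts_alt]
  rw [outerB]
  simp

-- ===== VERDICT (by name: the statement is the Claim_ definition above) =====
theorem min_cuts_spec : Claim_equal_min_cuts := by
  intro wall _ _
  unfold Spec_min_cuts
  rw [min_cuts_eq, min_cuts_alt_eq, maxCount_eq_maxRun]
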